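-- pv_equiv track=rewrite | github.com/Molecular-Biophysics-Database/mbdb-search | src/prettier_names.py | remove_if_equal
-- ===== SOURCE A (Python) =====
-- def remove_if_equal(field_paths):
--     split_paths = [field_path.split('.') for field_path in field_paths]
--     while True:
--         try:
--             unique_elements = {path[0] for path in split_paths}
--         except IndexError:
--             raise ValueError("duplicate field paths found, they should be unique")
--
--         if len(unique_elements) != 1:
--             break
--
--         for path in split_paths:
--             path.pop(0)
--
--     return {field_path: ".".join(split_path) for field_path, split_path in zip(field_paths, split_paths)}
-- ===== SOURCE B (Python) =====
-- def remove_if_equal(field_paths):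
--     split_paths = [field_path.split('.') for field_path in field_paths]
--     if not field_paths:
--         return {}
--     prefix_len = 0
--     for column in zip(*split_paths):
--         if len(set(column)) != 1:
--             break
--         prefix_len += 1
--     else:
--         raise ValueError("duplicate field paths found, they should be unique")
--     return {fp: '.'.join(sp[prefix_len:]) for fp, sp in zip(field_paths, split_paths)}
-- ===== Notes on version B (the rewrite author's own statement) =====
-- stated objective: alternative
-- what changed: B replaces A's destructive while-loop that repeatedly pops the first component of every split path with a single forward scan over the transposed columns (zip(*split_paths)) counting the uniform prefix length, then slices each path once; the for-else raises the same ValueError exactly where A's loop runs off the shortest path.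
import Mathlib
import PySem

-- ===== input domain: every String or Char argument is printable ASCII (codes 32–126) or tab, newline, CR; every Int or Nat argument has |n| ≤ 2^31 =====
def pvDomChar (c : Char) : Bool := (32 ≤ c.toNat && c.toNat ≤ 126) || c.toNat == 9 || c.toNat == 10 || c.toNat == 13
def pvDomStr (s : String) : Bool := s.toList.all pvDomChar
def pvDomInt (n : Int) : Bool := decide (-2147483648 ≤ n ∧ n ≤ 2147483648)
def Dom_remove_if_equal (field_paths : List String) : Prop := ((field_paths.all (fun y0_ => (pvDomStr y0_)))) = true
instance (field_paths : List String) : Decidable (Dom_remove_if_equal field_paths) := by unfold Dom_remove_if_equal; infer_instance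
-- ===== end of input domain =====

-- B strips the common dotted prefix in one forward pass over transposed columns instead of
-- A's repeated pop(0) mutation loop; objective: alternative decomposition (same asymptotic cost).

-- f.split('.') with a nonempty separator (never raises)
def pvSplit (f : String) : List String := (PySem.Str.split? f ".").getD []

-- termination measure lemmas for the two recursions (cited in decreasing_by)
theorem pv_drop_sum_le (sp : List (List String)) :
    ((sp.map (fun p => p.drop 1)).map List.length).sum ≤ (sp.map List.length).sum := by
  induction sp with
  | nil => simp
  | cons p rest ih => simp only [List.map_cons, List.sum_cons]; have := List.length_drop (l := p) (i := 1); omega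

theorem pv_drop_sum_lt (sp : List (List String)) (hne : sp ≠ [])
    (h1 : ∀ p ∈ sp, p.isEmpty = false) :
    ((sp.map (fun p => p.drop 1)).map List.length).sum < (sp.map List.length).sum := by
  cases sp with
  | nil => exact absurd rfl hne
  | cons p rest =>
    simp only [List.map_cons, List.sum_cons]
    have hp : p.isEmpty = false := h1 p (by simp)
    have hlen : 0 < p.length := by
      cases p with
      | nil => simp at hp
      | cons _ _ => simp
    have := pv_drop_sum_le rest
    have := List.length_drop (l := p) (i := 1)
    omega

-- ===== PORT A =====
-- A's while-True loop: pop the first component of every path while all first components agree;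
-- the `any isEmpty` branch is Python's IndexError → ValueError path (excluded by Pre_)
def pvALoop (sp : List (List String)) : List (List String) :=
  if h1 : sp.any (fun p => p.isEmpty) then sp
  else if (PySem.Set.ofList (sp.map (fun p => p.headD ""))).length ≠ 1 then sp
  else pvALoop (sp.map (fun p => p.drop 1))
termination_by (sp.map List.length).sum
decreasing_by
  rename_i h2
  simp only [List.map_attach_eq_pmap, List.pmap_eq_map]
  refine pv_drop_sum_lt sp ?_ ?_
  · intro hc; subst hc; simp [PySem.Set.ofList] at h2
  · intro p hp
    simp only [List.any_eq_true] at h1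
    by_contra hc
    exact h1 ⟨p, hp, by simpa using hc⟩

def remove_if_equal (field_paths : List String) : List (String × String) :=
  let split_paths := field_paths.map pvSplit
  let final := pvALoop split_paths
  (PySem.Dict.ofList ((field_paths.zip final).map
      (fun q => (q.1, PySem.Str.join "." q.2)))).items

-- ===== PORT B =====
-- zip(*split_paths): the list of columns, stopping at the shortest path
def pvTranspose (sp : List (List String)) : List (List String) :=
  if sp.isEmpty then []
  else if h1 : sp.any (fun p => p.isEmpty) then []
  else (sp.map (fun p => p.headD "")) :: pvTranspose (sp.map (fun p => p.drop 1))
termination_by (sp.map List.length).sum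
decreasing_by
  rename_i h0
  simp only [List.map_attach_eq_pmap, List.pmap_eq_map]
  refine pv_drop_sum_lt sp (by simpa using h0) ?_
  intro p hp
  simp only [List.any_eq_true] at h1
  by_contra hc
  exact h1 ⟨p, hp, by simpa using hc⟩

-- the for-column loop: break at the first non-uniform column (some i) / else (none = raise ValueError)
def pvCountPrefix : List (List String) → Option Nat
  | [] => none
  | c :: rest =>
    if (PySem.Set.ofList c).length ≠ 1 then some 0
    else (pvCountPrefix rest).map (· + 1)

def remove_if_equal_alt (field_paths : List String) : List (String × String) :=
  let split_paths := field_paths.map pvSplit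
  if field_paths.isEmpty then []
  else
    match pvCountPrefix (pvTranspose split_paths) with
    | none => []   -- raise ValueError (excluded by Pre_)
    | some k =>
      (PySem.Dict.ofList ((field_paths.zip split_paths).map
          (fun q => (q.1, PySem.Str.join "." (q.2.drop k))))).items

-- ===== PRECONDITION & SPEC =====
-- Pre_ excludes exactly the inputs on which A raises ValueError: a nonempty list whose shortest
-- split path is entirely a shared prefix of all split paths (e.g. a single path, or all paths equal).
def Pre_remove_if_equal (field_paths : List String) : Prop :=
  field_paths = [] ∨
    (∃ i < (((field_paths.map (fun f => (pvSplit f).length)).min?).getD 0),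
      ∃ a ∈ field_paths, ∃ b ∈ field_paths, (pvSplit a).getD i "" ≠ (pvSplit b).getD i "")
instance (field_paths : List String) : Decidable (Pre_remove_if_equal field_paths) := by
  unfold Pre_remove_if_equal; infer_instance

def pvWitness_remove_if_equal : List String := ["a.b", "a.c"]

def Spec_remove_if_equal (field_paths : List String) (out : List (String × String)) : Prop := out = remove_if_equal_alt field_paths
instance (field_paths : List String) (out : List (String × String)) : Decidable (Spec_remove_if_equal field_paths out) := by unfold Spec_remove_if_equal; infer_instance

-- ===== CLAIM (what is proved, stated in full; the proofs are below) =====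
def Claim_equal_remove_if_equal : Prop := ∀ (field_paths : List String), Dom_remove_if_equal field_paths → Pre_remove_if_equal field_paths → Spec_remove_if_equal field_paths (remove_if_equal field_paths)

-- ===== LEMMAS AND PROOFS =====

-- a uniform column (set of size 1) has all elements equal
theorem pv_set_len_one {xs : List String} (h : (PySem.Set.ofList xs).length = 1)
    {x y : String} (hx : x ∈ xs) (hy : y ∈ xs) : x = y := by
  obtain ⟨z, hz⟩ := List.length_eq_one_iff.mp h
  have hx' : x ∈ PySem.Set.ofList xs := by rw [PySem.Set.mem_ofList]; exact hx
  have hy' : y ∈ PySem.Set.ofList xs := by rw [PySem.Set.mem_ofList]; exact hy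
  rw [hz] at hx' hy'
  simp at hx' hy'
  rw [hx', hy']

-- countPrefix finds some k ⇒ A's loop drops exactly k components from every path
theorem pv_loop_drop (sp : List (List String)) (hne : sp ≠ []) (k : Nat)
    (h : pvCountPrefix (pvTranspose sp) = some k) :
    pvALoop sp = sp.map (fun p => p.drop k) := by
  induction k generalizing sp with
  | zero =>
    rw [pvTranspose] at h
    by_cases he : sp.any (fun p => p.isEmpty)
    · simp [List.isEmpty_iff, hne, he, pvCountPrefix] at h
    · rw [if_neg (by simp [List.isEmpty_iff, hne]), dif_neg he] at h
      rw [pvCountPrefix] at h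
      by_cases hc : (PySem.Set.ofList (sp.map (fun p => p.headD ""))).length ≠ 1
      · rw [pvALoop, dif_neg he, if_pos hc]
        simp
      · rw [if_neg hc] at h
        simp at h
  | succ k ih =>
    rw [pvTranspose] at h
    by_cases he : sp.any (fun p => p.isEmpty)
    · simp [List.isEmpty_iff, hne, he, pvCountPrefix] at h
    · rw [if_neg (by simp [List.isEmpty_iff, hne]), dif_neg he] at h
      rw [pvCountPrefix] at h
      by_cases hc : (PySem.Set.ofList (sp.map (fun p => p.headD ""))).length ≠ 1
      · rw [if_pos hc] at h
        simp at h
      · rw [if_neg hc] at h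
        simp only [Option.map_eq_some_iff] at h
        obtain ⟨k', hk', hkk⟩ := h
        have : k' = k := by omega
        subst this
        have htne : (sp.map (fun p => p.drop 1)) ≠ [] := by
          intro hc2; exact hne (by simpa using hc2)
        rw [pvALoop, dif_neg he, if_neg hc, ih _ htne hk']
        simp only [List.map_map]
        apply List.map_congr_left
        intro p _
        simp [Function.comp]

-- the witness column of Pre_ forces countPrefix to break (return some)
theorem pv_count_some (i : Nat) (sp : List (List String))
    (hb0 : ∀ p ∈ sp, i < p.length)
    (hw : ∃ a ∈ sp, ∃ b ∈ sp, a.getD i "" ≠ b.getD i "") :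
    ∃ k, pvCountPrefix (pvTranspose sp) = some k := by
  induction i generalizing sp with
  | zero =>
    obtain ⟨a, ha, b, hb, hab⟩ := hw
    have hse : sp.isEmpty = false := by
      cases sp with
      | nil => simp at ha
      | cons h t => simp
    have he : sp.any (fun p => p.isEmpty) = false := by
      simp only [List.any_eq_false]
      intro p hp
      have := hb0 p hp
      cases p with
      | nil => simp at this
      | cons h t => simp
    rw [pvTranspose]
    simp only [hse, Bool.false_eq_true, if_false, he, dif_neg, not_false_eq_true,
      pvCountPrefix]
    split_ifs with h1
    · exact ⟨0, rfl⟩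
    · push_neg at h1
      exfalso
      apply hab
      have ha' : a.headD "" ∈ sp.map (fun p => p.headD "") := List.mem_map_of_mem ha
      have hb' : b.headD "" ∈ sp.map (fun p => p.headD "") := List.mem_map_of_mem hb
      have := pv_set_len_one h1 ha' hb'
      have hha : a.getD 0 "" = a.headD "" := by cases a <;> simp [List.getD]
      have hhb : b.getD 0 "" = b.headD "" := by cases b <;> simp [List.getD]
      rw [hha, hhb, this]
  | succ j ih =>
    obtain ⟨a, ha, b, hb, hab⟩ := hw
    have hse : sp.isEmpty = false := by
      cases sp with
      | nil => simp at ha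
      | cons h t => simp
    have he : sp.any (fun p => p.isEmpty) = false := by
      simp only [List.any_eq_false]
      intro p hp
      have := hb0 p hp
      cases p with
      | nil => simp at this
      | cons h t => simp
    rw [pvTranspose]
    simp only [hse, Bool.false_eq_true, if_false, he, dif_neg, not_false_eq_true,
      pvCountPrefix]
    split_ifs with h1
    · exact ⟨0, rfl⟩
    · obtain ⟨k, hk⟩ := ih (sp.map (fun p => p.drop 1))
        (by
          intro p hp
          obtain ⟨q, hq, rfl⟩ := List.mem_map.mp hp
          have := hb0 q hq
          simp; omega)
        ⟨a.drop 1, List.mem_map_of_mem ha, b.drop 1, List.mem_map_of_mem hb, by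
          have hda : (a.drop 1).getD j "" = a.getD (1 + j) "" := by
            simp [List.getD_eq_getElem?_getD, Nat.add_comm]
          have hdb : (b.drop 1).getD j "" = b.getD (1 + j) "" := by
            simp [List.getD_eq_getElem?_getD, Nat.add_comm]
          rw [hda, hdb, Nat.add_comm]
          exact hab⟩
      exact ⟨k + 1, by rw [hk]; rfl⟩

-- ===== VERDICT (by name: the statement is the Claim_ definition above) =====
-- the common-prefix bound of Pre_ bounds every split path's length
theorem pv_min_bound (fps : List String) (i : Nat)
    (hi : i < (((fps.map (fun f => (pvSplit f).length)).min?).getD 0)) :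
    ∀ p ∈ fps.map pvSplit, i < p.length := by
  intro p hp
  obtain ⟨f, hf, rfl⟩ := List.mem_map.mp hp
  cases hm : (fps.map (fun f => (pvSplit f).length)).min? with
  | none => rw [hm] at hi; simp at hi
  | some m =>
    rw [hm] at hi
    simp only [Option.getD_some] at hi
    have hle : m ≤ (pvSplit f).length :=
      (List.min?_eq_some_iff.mp hm).2 _ (List.mem_map_of_mem hf)
    omega

-- ===== VERDICT (by name: the statement is the Claim_ definition above) =====
theorem remove_if_equal_spec : Claim_equal_remove_if_equal := by
  intro fps _ hpre
  unfold Spec_remove_if_equal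
  rcases hpre with rfl | ⟨i, hi, a, ha, b, hb, hab⟩
  · simp [remove_if_equal, remove_if_equal_alt, pvALoop, PySem.Set.ofList,
      PySem.Dict.ofList, PySem.Dict.update, PySem.Dict.empty]
  · have hne : fps ≠ [] := by rintro rfl; simp at ha
    have hb0 := pv_min_bound fps i hi
    obtain ⟨k, hk⟩ := pv_count_some i (fps.map pvSplit) hb0
      ⟨pvSplit a, List.mem_map_of_mem ha, pvSplit b, List.mem_map_of_mem hb, hab⟩
    have hloop := pv_loop_drop (fps.map pvSplit) (by simpa using hne) k hk
    simp only [remove_if_equal, remove_if_equal_alt, hloop, hk,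
      List.isEmpty_iff, hne, if_false]
    congr 1
    rw [List.zip_map_right, List.map_map]
    rfl
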